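-- pv_equiv track=rewrite | github.com/Rymul/DSA_Python | stacks.py | nesting_score
-- ===== SOURCE A (Python) =====
-- def nesting_score(string):
--     """Returns the score of the string bracket counts where:
--     [] = 1
--     [n] = 2 * n points where n is the score of the substring"""
--     stack = [0]
--     for char in string:
--         if char == '[':
--             stack.append(0)
--         else:
--             popped = stack.pop()
--             if popped == 0:
--                 stack[-1] += 1
--             else:
--                 stack[-1] += popped * 2
--     return stack[0]
-- ===== SOURCE B (Python) =====
-- def nesting_score(string):
--     """Returns the score of the string bracket counts where:
--     [] = 1
--     [n] = 2 * n points where n is the score of the substring"""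
--     def parse(i):
--         """Parse one nesting level starting at position i.
--         Returns (score, position after the level, whether a closing char ended it)."""
--         score = 0
--         while i < len(string):
--             if string[i] == '[':
--                 inner, i, closed = parse(i + 1)
--                 if closed:
--                     score += inner * 2 if inner else 1
--             else:
--                 return score, i + 1, True
--         return score, i, False
--
--     score, _, _ = parse(0)
--     return score
-- ===== Notes on version B (the rewrite author's own statement) =====
-- stated objective: alternative
-- what changed: Replaces A's explicit score stack with a recursive-descent parser that walks the string once with a position index, recursing on '[' and combining each closed child's score as 2*inner (or 1 when empty); Pre_ excludes only the inputs with an unmatched closing character, on which A raises IndexError.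
import Mathlib
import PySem

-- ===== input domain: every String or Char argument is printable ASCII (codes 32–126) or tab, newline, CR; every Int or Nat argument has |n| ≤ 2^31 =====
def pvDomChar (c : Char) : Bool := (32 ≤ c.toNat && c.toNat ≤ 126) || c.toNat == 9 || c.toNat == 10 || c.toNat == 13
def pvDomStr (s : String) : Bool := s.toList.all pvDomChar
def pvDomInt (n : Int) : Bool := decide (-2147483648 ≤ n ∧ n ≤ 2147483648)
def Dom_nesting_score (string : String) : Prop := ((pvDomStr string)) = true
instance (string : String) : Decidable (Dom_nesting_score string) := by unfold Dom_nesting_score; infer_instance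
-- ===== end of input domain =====

-- B replaces A's explicit score stack by a recursive-descent parser over the nesting
-- structure; equal return value on Pre_ (the inputs where A returns).

-- ===== PORT A =====
-- One loop iteration of A. The Python stack is represented top-first (stack[-1] = head,
-- stack.append = cons, stack.pop = uncons). Where Python raises IndexError (pop leaves no
-- stack[-1]) the port returns []; Pre_ excludes exactly those inputs.
def stepA (stack : List Int) (c : Char) : List Int :=
  if c = '[' then 0 :: stack
  else
    match stack with
    | popped :: top :: rest => (top + (if popped = 0 then 1 else popped * 2)) :: rest
    | _ => []

def nesting_score (string : String) : Int :=
  -- stack = [0]; for char in string: ... ; return stack[0]  (stack[0] = bottom = last, top-first)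
  ((string.toList.foldl stepA [0]).getLast?).getD 0  -- getD 0 unreachable under Pre_

-- ===== PORT B =====
-- parse(i) of Source B, on the remaining character list instead of an index; the Nat argument is
-- fuel making the nested recursion structurally terminating (exact whenever fuel ≥ length,
-- as at the call site). Returns (score, remaining chars, closed?).
def parseB : Nat → List Char → Int → Int × List Char × Bool
  | _, [], score => (score, [], false)
  | 0, c :: rest, score => (score, c :: rest, false)  -- unreachable: fuel ≥ length throughout
  | f + 1, c :: rest, score =>
    if c = '[' then
      let r := parseB f rest 0
      parseB f r.2.1 (if r.2.2 then score + (if r.1 = 0 then 1 else r.1 * 2) else score)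
    else (score, rest, true)

def nesting_score_alt (string : String) : Int :=
  (parseB string.toList.length string.toList 0).1

-- ===== PRECONDITION & SPEC =====
-- +1 per '[', -1 per any other character (every non-'[' char pops in A)
def chval (c : Char) : Int := if c = '[' then 1 else -1
def balInt (m : List Char) : Int := (m.map chval).sum

-- Pre_ excludes exactly the inputs on which A raises IndexError: those where some prefix
-- has more closing (non-'[') characters than '['. A returns on everything Pre_ admits.
def Pre_nesting_score (string : String) : Prop :=
  -- e.g. "[[]]" is admitted
  ∀ i ≤ string.toList.length, 0 ≤ balInt (string.toList.take i)
instance (string : String) : Decidable (Pre_nesting_score string) := by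
  unfold Pre_nesting_score; infer_instance

def pvWitness_nesting_score : String := "[[]][]"

def Spec_nesting_score (string : String) (out : Int) : Prop := out = nesting_score_alt string
instance (string : String) (out : Int) : Decidable (Spec_nesting_score string out) := by
  unfold Spec_nesting_score; infer_instance

-- ===== CLAIM =====
def Claim_equal_nesting_score : Prop :=
  ∀ (string : String), Dom_nesting_score string → Pre_nesting_score string →
    Spec_nesting_score string (nesting_score string)

-- ===== LEMMAS AND PROOFS =====

theorem balInt_cons (c : Char) (m : List Char) : balInt (c :: m) = chval c + balInt m := by
  simp [balInt]

theorem balInt_append (a b : List Char) : balInt (a ++ b) = balInt a + balInt b := by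
  simp [balInt]

-- Core correspondence between A's stack fold and B's parser, by induction on fuel:
-- a level closed by a close char consumes a prefix of balance -1 and performs exactly
-- A's pop-and-add on the two top stack slots; a level exhausted by end of input leaves
-- its accumulated score on the stack under the frames of its unclosed descendants.
theorem coreB : ∀ (f : Nat) (cs : List Char) (acc : Int), cs.length ≤ f →
    ((parseB f cs acc).2.2 = true →
      ∃ pre, cs = pre ++ (parseB f cs acc).2.1 ∧ balInt pre = -1 ∧
        ∀ (t : Int) (ts : List Int),
          List.foldl stepA (acc :: t :: ts) pre
            = (t + (if (parseB f cs acc).1 = 0 then 1 else (parseB f cs acc).1 * 2)) :: ts) ∧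
    ((parseB f cs acc).2.2 = false →
      (parseB f cs acc).2.1 = [] ∧
        ∀ (ts : List Int), ∃ junk,
          List.foldl stepA (acc :: ts) cs = junk ++ (parseB f cs acc).1 :: ts) := by
  intro f
  induction f with
  | zero =>
    intro cs acc hlen
    have : cs = [] := List.eq_nil_of_length_eq_zero (Nat.le_zero.mp hlen)
    subst this
    refine ⟨fun h => by simp [parseB] at h, fun _ => ⟨rfl, fun ts => ⟨[], rfl⟩⟩⟩
  | succ f ih =>
    intro cs acc hlen
    match cs with
    | [] =>
      refine ⟨fun h => by simp [parseB] at h, fun _ => ⟨rfl, fun ts => ⟨[], rfl⟩⟩⟩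
    | c :: rest =>
      by_cases hc : c = '['
      · -- open: recurse into the child, then continue the level
        subst hc
        have hr : rest.length ≤ f := by simpa using hlen
        obtain ⟨ih1c, ih1u⟩ := ih rest 0 hr
        have hunf : parseB (f + 1) ('[' :: rest) acc
            = parseB f (parseB f rest 0).2.1
                (if (parseB f rest 0).2.2 then
                  acc + (if (parseB f rest 0).1 = 0 then 1 else (parseB f rest 0).1 * 2)
                 else acc) := by
          simp [parseB]
        cases hcl1 : (parseB f rest 0).2.2 with
        | true =>
          obtain ⟨pre1, hsplit1, hbal1, hfold1⟩ := ih1c hcl1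
          set acc' := acc + (if (parseB f rest 0).1 = 0 then 1 else (parseB f rest 0).1 * 2)
            with hacc'
          have hlen2 : (parseB f rest 0).2.1.length ≤ f := by
            have h := congrArg List.length hsplit1
            rw [List.length_append] at h
            omega
          obtain ⟨ih2c, ih2u⟩ := ih (parseB f rest 0).2.1 acc' hlen2
          have hres : parseB (f + 1) ('[' :: rest) acc = parseB f (parseB f rest 0).2.1 acc' := by
            rw [hunf, hcl1]; simp
          constructor
          · intro hcl2
            rw [hres] at hcl2 ⊢
            obtain ⟨pre2, hsplit2, hbal2, hfold2⟩ := ih2c hcl2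
            refine ⟨'[' :: (pre1 ++ pre2), ?_, ?_, ?_⟩
            · simp only [List.cons_append, List.append_assoc]
              rw [← hsplit2, ← hsplit1]
            · rw [balInt_cons, balInt_append, hbal1, hbal2]
              simp [chval]
            · intro t ts
              have hs1 : stepA (acc :: t :: ts) '[' = 0 :: acc :: t :: ts := by simp [stepA]
              simp only [List.foldl_cons, hs1, List.foldl_append]
              rw [hfold1 acc (t :: ts)]
              exact hfold2 t ts
          · intro hcl2
            rw [hres] at hcl2 ⊢
            obtain ⟨hrest2, hfold2⟩ := ih2u hcl2
            refine ⟨hrest2, fun ts => ?_⟩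
            obtain ⟨junk2, hj2⟩ := hfold2 ts
            have hs1 : stepA (acc :: ts) '[' = 0 :: acc :: ts := by simp [stepA]
            refine ⟨junk2, ?_⟩
            rw [show ('[' :: rest) = '[' :: (pre1 ++ (parseB f rest 0).2.1) by rw [← hsplit1],
              List.foldl_cons, hs1, List.foldl_append, hfold1 acc ts]
            exact hj2
        | false =>
          obtain ⟨hrest1, hfold1⟩ := ih1u hcl1
          have hres : parseB (f + 1) ('[' :: rest) acc = (acc, [], false) := by
            rw [hunf, hcl1, hrest1]
            simp [parseB]
          constructor
          · intro hcl2; rw [hres] at hcl2; simp at hcl2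
          · intro _
            rw [hres]
            refine ⟨rfl, fun ts => ?_⟩
            obtain ⟨junk1, hj1⟩ := hfold1 (acc :: ts)
            have hs1 : stepA (acc :: ts) '[' = 0 :: acc :: ts := by simp [stepA]
            refine ⟨junk1 ++ [(parseB f rest 0).1], ?_⟩
            rw [List.foldl_cons, hs1, hj1]
            simp
      · -- close: this level ends here
        have hres : parseB (f + 1) (c :: rest) acc = (acc, rest, true) := by
          simp [parseB, hc]
        constructor
        · intro _
          rw [hres]
          refine ⟨[c], by simp, by simp [balInt, chval, hc], fun t ts => ?_⟩
          simp [stepA, hc]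
        · intro h; rw [hres] at h; simp at h

-- ===== VERDICT =====
theorem nesting_score_spec : Claim_equal_nesting_score := by
  intro s _ hpre
  unfold Spec_nesting_score nesting_score nesting_score_alt
  set cs := s.toList with hcs
  obtain ⟨hcl, hop⟩ := coreB cs.length cs 0 le_rfl
  cases hcl2 : (parseB cs.length cs 0).2.2 with
  | true =>
    -- a closed top level means a prefix of negative balance, contradicting Pre_
    obtain ⟨pre, hsplit, hbal, _⟩ := hcl hcl2
    exfalso
    have hlen : pre.length ≤ cs.length := by rw [hsplit]; simp
    have htake : cs.take pre.length = pre := by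
      rw [hsplit, List.take_append_of_le_length le_rfl, List.take_length]
    have := hpre pre.length (by simpa [hcs] using hlen)
    rw [← hcs, htake, hbal] at this
    omega
  | false =>
    obtain ⟨-, hfold⟩ := hop hcl2
    obtain ⟨junk, hj⟩ := hfold []
    rw [hj]
    simp
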